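-- pv_equiv track=rewrite | github.com/iplweb/bpp | src/bpp/util.py | fulltext_tokenize
-- ===== SOURCE A (Python) =====
-- def fulltext_tokenize(s):
--     s = (
--         s.replace(":", " ")
--         .replace("*", " ")
--         .replace('"', " ")
--         .replace("|", " ")
--         .replace("'", " ")
--         .replace("&", " ")
--         .replace("\\", " ")
--         .replace("(", " ")
--         .replace(")", " ")
--         .replace("#", " ")
--         .replace("@", " ")
--         .replace("!", " ")
--         .replace("[", " ")
--         .replace("]", " ")
--         .replace("\t", " ")
--         .replace("\n", " ")
--         .replace("\r", " ")
--         .replace("<", " ")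
--         .replace(">", " ")
--     )
--     return [x.strip() for x in s.strip().split(" ") if x.strip()]
-- ===== SOURCE B (Python) =====
-- _DELIMS = frozenset(' \t\n\r:*"|\'&\\()#@![]<>')
--
-- def fulltext_tokenize(s):
--     tokens = []
--     buf = []
--     for ch in s:
--         if ch in _DELIMS:
--             if buf:
--                 tokens.append("".join(buf))
--                 buf = []
--         else:
--             buf.append(ch)
--     if buf:
--         tokens.append("".join(buf))
--     return tokens
-- ===== Notes on version B (the rewrite author's own statement) =====
-- stated objective: simpler
-- what changed: Replaced the 19-pass replace-punctuation-then-strip/split pipeline by a single left-to-right scan that accumulates a token buffer and flushes it at each delimiter from a fixed 22-character set.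
import Mathlib
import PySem

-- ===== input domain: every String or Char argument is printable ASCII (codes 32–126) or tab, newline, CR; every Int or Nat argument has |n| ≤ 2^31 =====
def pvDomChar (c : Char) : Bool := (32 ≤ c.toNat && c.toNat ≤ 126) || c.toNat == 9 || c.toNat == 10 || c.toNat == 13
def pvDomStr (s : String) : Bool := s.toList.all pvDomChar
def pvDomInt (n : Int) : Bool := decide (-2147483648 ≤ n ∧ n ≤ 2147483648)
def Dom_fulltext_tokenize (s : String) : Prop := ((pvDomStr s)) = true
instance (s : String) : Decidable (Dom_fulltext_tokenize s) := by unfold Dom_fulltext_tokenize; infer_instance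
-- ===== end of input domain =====

-- B replaces A's 19-pass replace/strip/split pipeline by one single-pass scan with a token buffer
-- over a fixed delimiter set (objective: alternative decomposition, one pass over the string).

-- ===== PORT A =====
def fulltext_tokenize (s : String) : List String :=
  let t1 := PySem.Str.replace s ":" " "
  let t2 := PySem.Str.replace t1 "*" " "
  let t3 := PySem.Str.replace t2 "\"" " "
  let t4 := PySem.Str.replace t3 "|" " "
  let t5 := PySem.Str.replace t4 "'" " "
  let t6 := PySem.Str.replace t5 "&" " "
  let t7 := PySem.Str.replace t6 "\\" " "
  let t8 := PySem.Str.replace t7 "(" " "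
  let t9 := PySem.Str.replace t8 ")" " "
  let t10 := PySem.Str.replace t9 "#" " "
  let t11 := PySem.Str.replace t10 "@" " "
  let t12 := PySem.Str.replace t11 "!" " "
  let t13 := PySem.Str.replace t12 "[" " "
  let t14 := PySem.Str.replace t13 "]" " "
  let t15 := PySem.Str.replace t14 "\t" " "
  let t16 := PySem.Str.replace t15 "\n" " "
  let t17 := PySem.Str.replace t16 "\r" " "
  let t18 := PySem.Str.replace t17 "<" " "
  let t19 := PySem.Str.replace t18 ">" " "
  let pieces := (PySem.Str.split? (PySem.Str.strip t19) " ").getD []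
  (pieces.filter (fun x => PySem.Str.strip x ≠ "")).map PySem.Str.strip

-- ===== PORT B =====
-- the delimiter set of Source B: space, tab, newline, CR and the 16 punctuation characters
def pvDelims : List Char :=
  [' ', '\t', '\n', '\r', ':', '*', '"', '|', '\'', '&', '\\', '(', ')', '#', '@', '!', '[', ']', '<', '>']

-- the scanning loop of Source B: 'buf' is the current-token buffer, tokens are emitted in order
def pvScan : List Char → List Char → List (List Char)
  | [], buf => if buf = [] then [] else [buf]
  | c :: rest, buf =>
    if c ∈ pvDelims then
      (if buf = [] then pvScan rest [] else buf :: pvScan rest [])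
    else pvScan rest (buf ++ [c])

def fulltext_tokenize_alt (s : String) : List String :=
  (pvScan s.toList []).map String.ofList

-- ===== PRECONDITION & SPEC =====
def Spec_fulltext_tokenize (s : String) (out : List String) : Prop := out = fulltext_tokenize_alt s
instance (s : String) (out : List String) : Decidable (Spec_fulltext_tokenize s out) := by unfold Spec_fulltext_tokenize; infer_instance

-- ===== CLAIM (what is proved, stated in full; the proofs are below) =====
def Claim_equal_fulltext_tokenize : Prop := ∀ (s : String), Dom_fulltext_tokenize s → Spec_fulltext_tokenize s (fulltext_tokenize s)

-- ===== LEMMAS AND PROOFS =====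

-- the 19 characters A replaces, in A's order
def pvD19 : List Char :=
  [':', '*', '"', '|', '\'', '&', '\\', '(', ')', '#', '@', '!', '[', ']', '\t', '\n', '\r', '<', '>']

def pvSub (c : Char) : Char := if c ∈ pvD19 then ' ' else c

lemma char_eq_of_toNat {c : Char} {d : Char} (h : c.toNat = d.toNat) : c = d :=
  Char.ext (UInt32.toNat_inj.mp h)

lemma repl_go_map (d : Char) (l : List Char) : ∀ (fuel : ℕ) (acc : List Char), l.length ≤ fuel →
    PySem.Chars.replace.go [d] [' '] fuel l acc
      = acc.reverse ++ l.map (fun x => if x = d then ' ' else x) := by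
  induction l with
  | nil => intro fuel acc h; cases fuel <;> simp [PySem.Chars.replace.go]
  | cons c t ih =>
    intro fuel acc h
    cases fuel with
    | zero => simp at h
    | succ f =>
      rw [PySem.Chars.replace.go]
      simp only [List.isPrefixOf, List.map_cons]
      by_cases hc : c = d
      · subst hc
        simp only [beq_self_eq_true, Bool.true_and, if_pos]
        rw [show ([c].length) = 1 from rfl]
        simp only [List.drop_one, List.tail_cons]
        rw [ih f _ (by simpa using h)]
        simp
      · have hb : ((d == c) && List.isPrefixOf [] t) = false := by
          simp; exact fun hh => (hc hh.symm).elim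
        simp only [List.isPrefixOf] at hb ⊢
        rw [if_neg (by simp [hb])]
        rw [ih f _ (by simpa using h)]
        simp [hc]

lemma repl_map (l : List Char) (d : Char) :
    PySem.Chars.replace l [d] [' '] = l.map (fun x => if x = d then ' ' else x) := by
  have := repl_go_map d l l.length [] le_rfl
  simp [PySem.Chars.replace, this]

def pvSubL (ds : List Char) (c : Char) : Char := if c ∈ ds then ' ' else c

lemma start_step (l : List Char) (d : Char) :
    l.map (fun x => if x = d then ' ' else x) = l.map (pvSubL [d]) :=
  List.map_congr_left (fun c _ => by simp [pvSubL])

lemma map_step (l : List Char) (ds : List Char) (d : Char) (hd : d ≠ ' ') :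
    (l.map (pvSubL ds)).map (fun x => if x = d then ' ' else x) = l.map (pvSubL (d :: ds)) := by
  rw [List.map_map]
  apply List.map_congr_left
  intro c _
  simp only [Function.comp_apply, pvSubL, List.mem_cons]
  by_cases h1 : c ∈ ds
  · simp [h1, Ne.symm hd]
  · by_cases h2 : c = d
    · subst h2; simp [h1]
    · simp [h1, h2]

lemma final_step (l : List Char) :
    l.map (pvSubL ['>', '<', '\r', '\n', '\t', ']', '[', '!', '@', '#', ')', '(', '\\', '&', '\'', '|', '"', '*', ':']) = l.map pvSub :=
  List.map_congr_left (fun c _ => by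
    by_cases h : c ∈ pvD19
    · have h2 : pvSub c = ' ' := by simp [pvSub, h]
      rw [h2]
      simp only [pvD19, List.mem_cons, List.not_mem_nil, or_false] at h
      unfold pvSubL
      rw [if_pos (by simp only [List.mem_cons, List.not_mem_nil, or_false]; tauto)]
    · have h2 : pvSub c = c := by simp [pvSub, h]
      rw [h2]
      simp only [pvD19, List.mem_cons, List.not_mem_nil, or_false] at h
      unfold pvSubL
      rw [if_neg (by simp only [List.mem_cons, List.not_mem_nil, or_false]; tauto)])

-- the reference splitter: Python's split(" ") written as plain structural recursion
def pvSp : List Char → List Char → List (List Char)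
  | [], cur => [cur.reverse]
  | c :: t, cur => if c = ' ' then cur.reverse :: pvSp t [] else pvSp t (c :: cur)

lemma splitOn_go_eq (l : List Char) : ∀ (fuel : ℕ) (cur : List Char) (acc : List (List Char)),
    l.length ≤ fuel →
    PySem.Chars.splitOn.go [' '] fuel l cur acc = acc.reverse ++ pvSp l cur := by
  induction l with
  | nil => intro fuel cur acc h; cases fuel <;> simp [PySem.Chars.splitOn.go, pvSp]
  | cons c t ih =>
    intro fuel cur acc h
    cases fuel with
    | zero => simp at h
    | succ f =>
      rw [PySem.Chars.splitOn.go]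
      by_cases hc : c = ' '
      · subst hc
        simp only [List.isPrefixOf, beq_self_eq_true, Bool.true_and, if_pos]
        rw [show ([' '].length) = 1 from rfl]
        simp only [List.drop_one, List.tail_cons]
        rw [ih f _ _ (by simpa using h)]
        simp [pvSp]
      · have hb : ((' ' == c) && List.isPrefixOf ([] : List Char) t) = false := by
          simp; exact fun hh => (hc hh.symm).elim
        simp only [List.isPrefixOf] at hb ⊢
        rw [if_neg (by simp [hb])]
        rw [ih f _ _ (by simpa using h)]
        simp [pvSp, hc]

lemma splitOn_eq (l : List Char) : PySem.Chars.splitOn l [' '] = pvSp l [] := by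
  have := splitOn_go_eq l (l.length + 1) [] [] (by omega)
  simpa [PySem.Chars.splitOn] using this

lemma mem_delims_iff (c : Char) : c ∈ pvDelims ↔ (c = ' ' ∨ c ∈ pvD19) := by
  simp [pvDelims, pvD19]; tauto

lemma sub_eq_space_iff (c : Char) : pvSub c = ' ' ↔ c ∈ pvDelims := by
  rw [mem_delims_iff]
  unfold pvSub
  by_cases h : c ∈ pvD19 <;> simp [h]

lemma scan_sp (u : List Char) : ∀ buf : List Char,
    (∀ c ∈ u, c ∈ pvDelims ↔ c = ' ') →
    pvScan u buf = (pvSp u buf.reverse).filter (fun p => p ≠ []) := by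
  induction u with
  | nil =>
    intro buf _
    by_cases h : buf = [] <;> simp [pvScan, pvSp, h]
  | cons c t ih =>
    intro buf hu
    have hc := hu c (List.mem_cons_self ..)
    have ht : ∀ c ∈ t, c ∈ pvDelims ↔ c = ' ' := fun x hx => hu x (List.mem_cons_of_mem _ hx)
    by_cases hd : c ∈ pvDelims
    · have hsp : c = ' ' := hc.mp hd
      subst hsp
      rw [show pvScan (' ' :: t) buf = (if buf = [] then pvScan t [] else buf :: pvScan t []) from by
        simp [pvScan, hd]]
      rw [show pvSp (' ' :: t) buf.reverse = buf.reverse.reverse :: pvSp t [] from by simp [pvSp]]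
      by_cases hb : buf = [] <;> simp [hb, ih [] ht]
    · have hns : ¬ c = ' ' := fun h => hd (hc.mpr h)
      rw [show pvScan (c :: t) buf = pvScan t (buf ++ [c]) from by simp [pvScan, hd]]
      rw [show pvSp (c :: t) buf.reverse = pvSp t (c :: buf.reverse) from by simp [pvSp, hns]]
      have := ih (buf ++ [c]) ht
      simpa using this

lemma scan_map_sub (l : List Char) : ∀ buf : List Char,
    pvScan l buf = pvScan (l.map pvSub) buf := by
  induction l with
  | nil => intro buf; simp
  | cons c t ih =>
    intro buf
    by_cases hd : c ∈ pvDelims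
    · have hs : pvSub c = ' ' := (sub_eq_space_iff c).mpr hd
      have hd' : pvSub c ∈ pvDelims := by rw [hs]; simp [pvDelims]
      simp only [List.map_cons, pvScan, if_pos hd, if_pos hd', ih]
    · have hid : pvSub c = c := by
        unfold pvSub
        rw [if_neg (fun h => hd ((mem_delims_iff c).mpr (Or.inr h)))]
      simp only [List.map_cons, hid, pvScan, if_neg hd, ih]

lemma hu_map_sub (l : List Char) : ∀ c ∈ l.map pvSub, c ∈ pvDelims ↔ c = ' ' := by
  intro c hcm
  obtain ⟨c0, _, rfl⟩ := List.mem_map.mp hcm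
  constructor
  · intro h
    rcases (mem_delims_iff _).mp h with h' | h'
    · exact h'
    · unfold pvSub at h' ⊢
      by_cases h0 : c0 ∈ pvD19 <;> simp [h0] at h' ⊢
  · intro h; rw [h]; simp [pvDelims]

lemma isspace_ascii_false (c : Char) (h1 : 32 < c.toNat) (h2 : c.toNat ≤ 126) :
    PySem.Chars.isspace c = false := by
  simp [PySem.Chars.isspace]; omega

lemma hsp_map_sub (l : List Char) (hd : ∀ c ∈ l, pvDomChar c = true) :
    ∀ c ∈ l.map pvSub, PySem.Chars.isspace c = (c == ' ') := by
  intro c hcm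
  obtain ⟨c0, hc0, rfl⟩ := List.mem_map.mp hcm
  by_cases h0 : c0 ∈ pvD19
  · have : pvSub c0 = ' ' := by simp [pvSub, h0]
    rw [this]; decide
  · have hid : pvSub c0 = c0 := by simp [pvSub, h0]
    rw [hid]
    have hdc := hd c0 hc0
    simp [pvDomChar] at hdc
    by_cases hsp : c0 = ' '
    · rw [hsp]; decide
    · have hne : (c0 == ' ') = false := by simp [hsp]
      rw [hne]
      have h9 : c0.toNat ≠ 9 := by
        intro h; apply h0; have : c0 = '\t' := char_eq_of_toNat (by rw [h]; rfl); simp [this, pvD19]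
      have h10 : c0.toNat ≠ 10 := by
        intro h; apply h0; have : c0 = '\n' := char_eq_of_toNat (by rw [h]; rfl); simp [this, pvD19]
      have h13 : c0.toNat ≠ 13 := by
        intro h; apply h0; have : c0 = '\r' := char_eq_of_toNat (by rw [h]; rfl); simp [this, pvD19]
      have h32 : c0.toNat ≠ 32 := by
        intro h; apply hsp; exact char_eq_of_toNat (by rw [h]; rfl)
      apply isspace_ascii_false <;> omega

lemma strip_eq_of_nospace (p : List Char) (h : ∀ c ∈ p, PySem.Chars.isspace c = false) :
    PySem.Chars.strip p = p := by
  have key : ∀ q : List Char, (∀ c ∈ q, PySem.Chars.isspace c = false) →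
      List.dropWhile PySem.Chars.isspace q = q := by
    intro q hq
    cases q with
    | nil => rfl
    | cons a t => exact List.dropWhile_cons_of_neg (by simp [hq a (List.mem_cons_self ..)])
  unfold PySem.Chars.strip PySem.Chars.rstrip PySem.Chars.lstrip
  rw [key p h, key p.reverse (fun c hc => h c (List.mem_reverse.mp hc)), List.reverse_reverse]

lemma mem_strip (u : List Char) (c : Char) (h : c ∈ PySem.Chars.strip u) : c ∈ u := by
  unfold PySem.Chars.strip PySem.Chars.rstrip PySem.Chars.lstrip at h
  simp at h
  have h2 := (List.dropWhile_sublist (l := (List.dropWhile PySem.Chars.isspace u).reverse)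
    (p := PySem.Chars.isspace)).subset h
  simp at h2
  exact (List.dropWhile_sublist _).subset h2

lemma sp_chars (u : List Char) : ∀ (cur p : List Char), p ∈ pvSp u cur →
    ∀ c ∈ p, (c ∈ u ∧ c ≠ ' ') ∨ c ∈ cur := by
  induction u with
  | nil =>
    intro cur p hp c hc
    simp [pvSp] at hp
    subst hp; right; simpa using hc
  | cons a t ih =>
    intro cur p hp c hc
    by_cases ha : a = ' '
    · subst ha
      simp [pvSp] at hp
      rcases hp with rfl | hp
      · right; simpa using hc
      · rcases ih [] p hp c hc with ⟨h1, h2⟩ | h3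
        · exact Or.inl ⟨List.mem_cons_of_mem _ h1, h2⟩
        · simp at h3
    · rw [show pvSp (a :: t) cur = pvSp t (a :: cur) from by simp [pvSp, ha]] at hp
      rcases ih _ p hp c hc with ⟨h1, h2⟩ | h3
      · exact Or.inl ⟨List.mem_cons_of_mem _ h1, h2⟩
      · rcases List.mem_cons.mp h3 with rfl | h4
        · exact Or.inl ⟨List.mem_cons_self .., ha⟩
        · exact Or.inr h4

lemma sp_all_spaces (w : List Char) : ∀ cur : List Char, (∀ c ∈ w, c = ' ') →
    (pvSp w cur).filter (fun p => p ≠ []) = [cur.reverse].filter (fun p => p ≠ []) := by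
  induction w with
  | nil => intro cur _; rfl
  | cons a t ih =>
    intro cur hw
    have ha : a = ' ' := hw a (List.mem_cons_self ..)
    subst ha
    rw [show pvSp (' ' :: t) cur = cur.reverse :: pvSp t [] from by simp [pvSp]]
    rw [List.filter_cons]
    rw [ih [] (fun c hc => hw c (List.mem_cons_of_mem _ hc))]
    simp [List.filter_cons]

lemma sp_append_spaces (v : List Char) : ∀ (w cur : List Char), (∀ c ∈ w, c = ' ') →
    (pvSp (v ++ w) cur).filter (fun p => p ≠ []) = (pvSp v cur).filter (fun p => p ≠ []) := by
  induction v with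
  | nil =>
    intro w cur hw
    simpa [pvSp] using sp_all_spaces w cur hw
  | cons a t ih =>
    intro w cur hw
    by_cases ha : a = ' '
    · subst ha
      rw [show ((' ' :: t) ++ w) = ' ' :: (t ++ w) from rfl]
      rw [show pvSp (' ' :: (t ++ w)) cur = cur.reverse :: pvSp (t ++ w) [] from by simp [pvSp]]
      rw [show pvSp (' ' :: t) cur = cur.reverse :: pvSp t [] from by simp [pvSp]]
      rw [List.filter_cons, List.filter_cons, ih w [] hw]
    · rw [show ((a :: t) ++ w) = a :: (t ++ w) from rfl]
      rw [show pvSp (a :: (t ++ w)) cur = pvSp (t ++ w) (a :: cur) from by simp [pvSp, ha]]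
      rw [show pvSp (a :: t) cur = pvSp t (a :: cur) from by simp [pvSp, ha]]
      exact ih w (a :: cur) hw

lemma sp_dropWhile (u : List Char) :
    (pvSp (u.dropWhile (fun c => c == ' ')) []).filter (fun p => p ≠ [])
      = (pvSp u []).filter (fun p => p ≠ []) := by
  induction u with
  | nil => rfl
  | cons a t ih =>
    by_cases ha : a = ' '
    · subst ha
      rw [List.dropWhile_cons_of_pos (by simp)]
      rw [show pvSp (' ' :: t) [] = [].reverse :: pvSp t [] from by simp [pvSp]]
      rw [List.filter_cons]
      simpa using ih
    · rw [List.dropWhile_cons_of_neg (by simp [ha])]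

lemma strip_sp (u : List Char) (hsp : ∀ c ∈ u, PySem.Chars.isspace c = (c == ' ')) :
    (pvSp (PySem.Chars.strip u) []).filter (fun p => p ≠ [])
      = (pvSp u []).filter (fun p => p ≠ []) := by
  unfold PySem.Chars.strip
  set v := PySem.Chars.lstrip u with hv
  have hvm : ∀ c ∈ v, c ∈ u := by
    intro c hc
    exact (List.dropWhile_sublist _).subset hc
  have hspv : ∀ c ∈ v, PySem.Chars.isspace c = (c == ' ') := fun c hc => hsp c (hvm c hc)
  have hdecomp : v = PySem.Chars.rstrip v ++ (List.takeWhile PySem.Chars.isspace v.reverse).reverse := by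
    unfold PySem.Chars.rstrip
    have h1 := List.takeWhile_append_dropWhile (p := PySem.Chars.isspace) (l := v.reverse)
    have h2 := congrArg List.reverse h1
    rw [List.reverse_append, List.reverse_reverse] at h2
    exact h2.symm
  have hw : ∀ c ∈ (List.takeWhile PySem.Chars.isspace v.reverse).reverse, c = ' ' := by
    intro c hc
    rw [List.mem_reverse] at hc
    have h1 : PySem.Chars.isspace c = true := List.mem_takeWhile_imp hc
    have h2 : c ∈ v := List.mem_reverse.mp ((List.takeWhile_sublist _).subset hc)
    have h3 := hspv c h2
    rw [h1] at h3
    exact eq_of_beq h3.symm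
  have step1 : (pvSp (PySem.Chars.rstrip v) []).filter (fun p => p ≠ [])
      = (pvSp v []).filter (fun p => p ≠ []) := by
    conv_rhs => rw [hdecomp]
    exact (sp_append_spaces _ _ _ hw).symm
  rw [step1]
  have hlv : v = u.dropWhile (fun c => c == ' ') := by
    rw [hv]
    unfold PySem.Chars.lstrip
    clear hv hvm hspv hdecomp hw step1
    induction u with
    | nil => rfl
    | cons a t ih =>
      have ha := hsp a (List.mem_cons_self ..)
      by_cases h : a = ' '
      · subst h
        rw [List.dropWhile_cons_of_pos (by rw [ha]; rfl), List.dropWhile_cons_of_pos (by simp)]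
        exact ih (fun c hc => hsp c (List.mem_cons_of_mem _ hc))
      · rw [List.dropWhile_cons_of_neg (by simp [ha, h]), List.dropWhile_cons_of_neg (by simp [h])]
  rw [hlv]
  exact sp_dropWhile u

-- ===== VERDICT (by name: the statement is the Claim_ definition above) =====
set_option maxHeartbeats 2000000 in
theorem fulltext_tokenize_spec : Claim_equal_fulltext_tokenize := by
  intro s hdom
  have hd : ∀ c ∈ s.toList, pvDomChar c = true := by
    unfold Dom_fulltext_tokenize pvDomStr at hdom
    exact fun c hc => List.all_eq_true.mp hdom c hc
  show fulltext_tokenize s = fulltext_tokenize_alt s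
  unfold fulltext_tokenize fulltext_tokenize_alt
  simp only [PySem.Str.replace, PySem.Str.strip, PySem.Str.split?, PySem.Chars.split?,
    String.toList_ofList,
    show (":" : String).toList = [':'] from rfl,
    show ("*" : String).toList = ['*'] from rfl,
    show ("\"" : String).toList = ['"'] from rfl,
    show ("|" : String).toList = ['|'] from rfl,
    show ("'" : String).toList = ['\''] from rfl,
    show ("&" : String).toList = ['&'] from rfl,
    show ("\\" : String).toList = ['\\'] from rfl,
    show ("(" : String).toList = ['('] from rfl,
    show (")" : String).toList = [')'] from rfl,
    show ("#" : String).toList = ['#'] from rfl,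
    show ("@" : String).toList = ['@'] from rfl,
    show ("!" : String).toList = ['!'] from rfl,
    show ("[" : String).toList = ['['] from rfl,
    show ("]" : String).toList = [']'] from rfl,
    show ("\t" : String).toList = ['\t'] from rfl,
    show ("\n" : String).toList = ['\n'] from rfl,
    show ("\r" : String).toList = ['\r'] from rfl,
    show ("<" : String).toList = ['<'] from rfl,
    show (">" : String).toList = ['>'] from rfl,
    show (" " : String).toList = [' '] from rfl]
  simp only [repl_map]
  rw [start_step s.toList ':']
  rw [map_step s.toList [':'] '*' (by decide)]
  rw [map_step s.toList ['*', ':'] '"' (by decide)]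
  rw [map_step s.toList ['"', '*', ':'] '|' (by decide)]
  rw [map_step s.toList ['|', '"', '*', ':'] '\'' (by decide)]
  rw [map_step s.toList ['\'', '|', '"', '*', ':'] '&' (by decide)]
  rw [map_step s.toList ['&', '\'', '|', '"', '*', ':'] '\\' (by decide)]
  rw [map_step s.toList ['\\', '&', '\'', '|', '"', '*', ':'] '(' (by decide)]
  rw [map_step s.toList ['(', '\\', '&', '\'', '|', '"', '*', ':'] ')' (by decide)]
  rw [map_step s.toList [')', '(', '\\', '&', '\'', '|', '"', '*', ':'] '#' (by decide)]
  rw [map_step s.toList ['#', ')', '(', '\\', '&', '\'', '|', '"', '*', ':'] '@' (by decide)]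
  rw [map_step s.toList ['@', '#', ')', '(', '\\', '&', '\'', '|', '"', '*', ':'] '!' (by decide)]
  rw [map_step s.toList ['!', '@', '#', ')', '(', '\\', '&', '\'', '|', '"', '*', ':'] '[' (by decide)]
  rw [map_step s.toList ['[', '!', '@', '#', ')', '(', '\\', '&', '\'', '|', '"', '*', ':'] ']' (by decide)]
  rw [map_step s.toList [']', '[', '!', '@', '#', ')', '(', '\\', '&', '\'', '|', '"', '*', ':'] '\t' (by decide)]
  rw [map_step s.toList ['\t', ']', '[', '!', '@', '#', ')', '(', '\\', '&', '\'', '|', '"', '*', ':'] '\n' (by decide)]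
  rw [map_step s.toList ['\n', '\t', ']', '[', '!', '@', '#', ')', '(', '\\', '&', '\'', '|', '"', '*', ':'] '\r' (by decide)]
  rw [map_step s.toList ['\r', '\n', '\t', ']', '[', '!', '@', '#', ')', '(', '\\', '&', '\'', '|', '"', '*', ':'] '<' (by decide)]
  rw [map_step s.toList ['<', '\r', '\n', '\t', ']', '[', '!', '@', '#', ')', '(', '\\', '&', '\'', '|', '"', '*', ':'] '>' (by decide)]
  rw [final_step s.toList]
  rw [if_neg (by simp)]
  simp only [Option.map_some, Option.getD_some]
  rw [splitOn_eq]
  rw [List.filter_map, List.map_map]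
  have hsp : ∀ c ∈ s.toList.map pvSub, PySem.Chars.isspace c = (c == ' ') := hsp_map_sub s.toList hd
  have hu : ∀ c ∈ s.toList.map pvSub, c ∈ pvDelims ↔ c = ' ' := hu_map_sub s.toList
  -- the B side: scan of s equals scan of the substituted list, which is the filtered reference split
  rw [scan_map_sub s.toList [], scan_sp (s.toList.map pvSub) [] hu]
  -- normalise the filter predicate on the A side
  simp only [List.reverse_nil]
  -- tokens of the stripped substituted list carry no whitespace: strip is the identity on them
  have hid : ∀ p ∈ pvSp (PySem.Chars.strip (List.map pvSub s.toList)) [], PySem.Chars.strip p = p := by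
    intro p hp
    apply strip_eq_of_nospace
    intro c hc
    rcases sp_chars _ _ _ hp c hc with ⟨h1, h2⟩ | h3
    · rw [hsp c (mem_strip _ _ h1)]
      simp [h2]
    · simp at h3
  refine Eq.trans (List.map_congr_left ?_)
    (Eq.trans (congrArg (List.map String.ofList) (List.filter_congr ?_))
      (congrArg (List.map String.ofList) (strip_sp (List.map pvSub s.toList) hsp)))
  · intro p hp
    have hpS := List.mem_of_mem_filter hp
    simp only [Function.comp_apply, PySem.Str.strip, String.toList_ofList, hid p hpS]
  · intro p hp
    simp only [Function.comp_apply, String.toList_ofList, hid p hp]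
    exact decide_eq_decide.mpr
      (not_congr (by rw [show ("" : String) = String.ofList [] from rfl]; exact String.ofList_inj))
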